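-- pv_equiv track=rewrite | github.com/Vyshnavi-d-p-3/Sentinel | backend/app/routers/tests.py | _split_diff_by_file
-- ===== SOURCE A (Python) =====
-- def _split_diff_by_file(raw_diff: str) -> dict[str, str]:
--     out: dict[str, str] = {}
--     if not raw_diff.strip():
--         return out
--     parts = raw_diff.split("\ndiff --git ")
--     for idx, part in enumerate(parts):
--         piece = part if idx == 0 else "diff --git " + part
--         piece = piece.strip()
--         if not piece:
--             continue
--         first_line = piece.splitlines()[0]
--         path = first_line.split(" b/", 1)[1].strip() if " b/" in first_line else "unknown"
--         out[path] = piece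
--     return out
-- ===== SOURCE B (Python) =====
-- def _flush(out, block_lines):
--     piece = "\n".join(block_lines).strip()
--     if not piece:
--         return
--     first_line = piece.splitlines()[0]
--     path = first_line.split(" b/", 1)[1].strip() if " b/" in first_line else "unknown"
--     out[path] = piece
--
--
-- def _split_diff_by_file(raw_diff: str) -> dict[str, str]:
--     out: dict[str, str] = {}
--     if not raw_diff.strip():
--         return out
--     cur: list[str] = []
--     for line in raw_diff.split("\n"):
--         if line.startswith("diff --git "):
--             if cur:
--                 _flush(out, cur)
--             cur = [line]
--         else:
--             cur.append(line)
--     if cur: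
--         _flush(out, cur)
--     return out
-- ===== Notes on version B (the rewrite author's own statement) =====
-- stated objective: alternative
-- what changed: B replaces A's split on the "\ndiff --git " delimiter (with index-dependent re-prefixing of the parts) by a single forward scan over raw_diff.split("\n") that accumulates a current block and flushes it at each line starting with "diff --git ".
import Mathlib
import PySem

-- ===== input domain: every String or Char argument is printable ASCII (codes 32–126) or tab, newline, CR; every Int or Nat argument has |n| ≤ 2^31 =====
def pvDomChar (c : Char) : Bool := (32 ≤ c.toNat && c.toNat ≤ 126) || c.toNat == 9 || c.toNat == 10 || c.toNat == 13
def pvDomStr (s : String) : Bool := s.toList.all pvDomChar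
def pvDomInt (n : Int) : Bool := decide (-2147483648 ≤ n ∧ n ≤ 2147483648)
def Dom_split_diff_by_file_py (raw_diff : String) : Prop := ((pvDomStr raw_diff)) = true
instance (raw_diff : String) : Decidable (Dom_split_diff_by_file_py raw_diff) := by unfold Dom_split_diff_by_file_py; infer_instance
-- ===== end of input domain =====

-- B rebuilds the per-file pieces by a single forward scan over the lines (flushing a block at each
-- "diff --git " header line) instead of A's split on the "\ndiff --git " delimiter; same return value.

-- ===== PORT A =====
-- the "diff --git " header marker (shared string literal)
def pvD : List Char := "diff --git ".toList

def split_diff_by_file_py (raw_diff : String) : List (String × String) :=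
  let s := raw_diff.toList
  if PySem.Chars.strip s = [] then []
  else
    let parts := PySem.Chars.splitOn s ('\n' :: pvD)
    let out := (PySem.List.enumerate parts).foldl
      (fun (out : PySem.Dict (List Char) (List Char)) (ip : Int × List Char) =>
        let piece := PySem.Chars.strip (if ip.1 == 0 then ip.2 else pvD ++ ip.2)
        if piece = [] then out
        else
          -- here piece ≠ [], so splitlines piece ≠ [] and Python's [0] never raises
          let firstLine := (PySem.Chars.splitlines piece).headD []
          let path := if PySem.Chars.isIn " b/".toList firstLine
            then PySem.Chars.strip ((PySem.List.pyGet? (PySem.Chars.splitOnMax firstLine " b/".toList 1) 1).getD [])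
            else "unknown".toList
          out.insert path piece)
      (PySem.Dict.empty : PySem.Dict (List Char) (List Char))
    out.items.map (fun kv => (String.ofList kv.1, String.ofList kv.2))

-- ===== PORT B =====
-- B's helper _flush(out, block_lines)
def pvFlush (out : PySem.Dict (List Char) (List Char)) (blockLines : List (List Char)) :
    PySem.Dict (List Char) (List Char) :=
  let piece := PySem.Chars.strip (PySem.Chars.join ['\n'] blockLines)
  if piece = [] then out
  else
    -- here piece ≠ [], so splitlines piece ≠ [] and Python's [0] never raises
    let firstLine := (PySem.Chars.splitlines piece).headD []
    let path := if PySem.Chars.isIn " b/".toList firstLine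
      then PySem.Chars.strip ((PySem.List.pyGet? (PySem.Chars.splitOnMax firstLine " b/".toList 1) 1).getD [])
      else "unknown".toList
    out.insert path piece

def split_diff_by_file_py_alt (raw_diff : String) : List (String × String) :=
  let s := raw_diff.toList
  if PySem.Chars.strip s = [] then []
  else
    let st := (PySem.Chars.splitOn s ['\n']).foldl
      (fun (st : PySem.Dict (List Char) (List Char) × List (List Char)) (ln : List Char) =>
        if PySem.Chars.startswith ln pvD then
          (if st.2 = [] then st.1 else pvFlush st.1 st.2, [ln])
        else
          (st.1, st.2 ++ [ln]))
      ((PySem.Dict.empty : PySem.Dict (List Char) (List Char)), ([] : List (List Char)))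
    let out := if st.2 = [] then st.1 else pvFlush st.1 st.2
    out.items.map (fun kv => (String.ofList kv.1, String.ofList kv.2))

-- ===== PRECONDITION & SPEC =====
def Spec_split_diff_by_file_py (raw_diff : String) (out : List (String × String)) : Prop := out = split_diff_by_file_py_alt raw_diff
instance (raw_diff : String) (out : List (String × String)) : Decidable (Spec_split_diff_by_file_py raw_diff out) := by unfold Spec_split_diff_by_file_py; infer_instance

-- ===== CLAIM (what is proved, stated in full; the proofs are below) =====
def Claim_equal_split_diff_by_file_py : Prop := ∀ (raw_diff : String), Dom_split_diff_by_file_py raw_diff → Spec_split_diff_by_file_py raw_diff (split_diff_by_file_py raw_diff)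

-- ===== LEMMAS AND PROOFS =====

-- fuel-free specification of PySem.Chars.splitOn (for a nonempty separator)
def pvSplitSpec (sep : List Char) : List Char → List (List Char)
  | [] => [[]]
  | c :: rest =>
    if sep.isPrefixOf (c :: rest) then
      [] :: pvSplitSpec sep (rest.drop (sep.length - 1))
    else
      (pvSplitSpec sep rest).modifyHead (c :: ·)
termination_by s => s.length
decreasing_by
  · simp only [List.length_cons, List.length_drop]; omega
  · simp

theorem pvSplitSpec_ne_nil (sep s : List Char) : pvSplitSpec sep s ≠ [] := by
  fun_induction pvSplitSpec sep s
  all_goals simp_all [List.modifyHead_eq_nil_iff]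

theorem pvModifyHead_triv (l : List (List Char)) : l.modifyHead (fun x => x) = l := by
  cases l <;> simp

theorem pvGo_eq (sep : List Char) (hsep : sep ≠ []) :
    ∀ (fuel : Nat) (l cur : List Char) (acc : List (List Char)), l.length < fuel →
      PySem.Chars.splitOn.go sep fuel l cur acc
        = acc.reverse ++ (pvSplitSpec sep l).modifyHead (cur.reverse ++ ·) := by
  intro fuel
  induction fuel with
  | zero => intro l cur acc h; exact absurd h (Nat.not_lt_zero _)
  | succ n ih =>
    intro l cur acc h
    obtain ⟨a, sep', rfl⟩ : ∃ a sep', sep = a :: sep' := by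
      cases sep with
      | nil => exact absurd rfl hsep
      | cons a s => exact ⟨a, s, rfl⟩
    cases l with
    | nil =>
      rw [PySem.Chars.splitOn.go.eq_def]
      simp [pvSplitSpec]
    | cons c rest =>
      rw [PySem.Chars.splitOn.go.eq_def]
      change (if (a :: sep').isPrefixOf (c :: rest) = true then
          PySem.Chars.splitOn.go (a :: sep') n (List.drop (a :: sep').length (c :: rest)) []
            (cur.reverse :: acc)
        else PySem.Chars.splitOn.go (a :: sep') n rest (c :: cur) acc) = _
      rw [pvSplitSpec]
      by_cases hp : (a :: sep').isPrefixOf (c :: rest) = true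
      · rw [if_pos hp, if_pos hp]
        rw [ih _ _ _ (by simp only [List.length_drop, List.length_cons] at *; omega)]
        simp only [List.length_cons, Nat.add_sub_cancel, List.drop_succ_cons,
          List.reverse_nil, List.nil_append, List.reverse_cons, List.modifyHead_cons]
        rw [pvModifyHead_triv]
        simp
      · rw [if_neg hp, if_neg hp]
        rw [ih _ _ _ (by simp at h ⊢; omega)]
        rw [List.modifyHead_modifyHead]
        simp only [List.reverse_cons, List.append_assoc, List.singleton_append]
        have hcomp : ((fun x : List Char => cur.reverse ++ x) ∘ fun x => c :: x)
            = fun x : List Char => cur.reverse ++ c :: x := by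
          funext x; simp [Function.comp]
        rw [hcomp]

theorem pvSplitOn_eq (s sep : List Char) (hsep : sep ≠ []) :
    PySem.Chars.splitOn s sep = pvSplitSpec sep s := by
  have h0 : PySem.Chars.splitOn s sep = PySem.Chars.splitOn.go sep (s.length + 1) s [] [] := rfl
  rw [h0, pvGo_eq sep hsep _ _ _ _ (Nat.lt_succ_self _)]
  have h2 : (pvSplitSpec sep s).modifyHead (List.reverse [] ++ ·) = pvSplitSpec sep s := by
    have : (fun x : List Char => List.reverse [] ++ x) = (fun x : List Char => x) := by
      funext x; simp
    rw [this, pvModifyHead_triv]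
  rw [h2]
  simp

-- splitting at a separator that starts with a character absent from the prefix l
theorem pvFree_append (h : Char) (tl : List Char) :
    ∀ (l r : List Char), h ∉ l →
      pvSplitSpec (h :: tl) (l ++ r) = (pvSplitSpec (h :: tl) r).modifyHead (l ++ ·) := by
  intro l
  induction l with
  | nil =>
    intro r _
    simp only [List.nil_append, pvModifyHead_triv]
  | cons c l' ih =>
    intro r hns
    have hne : h ≠ c := fun e => hns (by simp [e])
    have hb : (h == c) = false := beq_eq_false_iff_ne.mpr hne
    rw [List.cons_append, pvSplitSpec]
    rw [if_neg (by simp [List.isPrefixOf_cons₂, hb])]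
    rw [ih r (fun hm => hns (List.mem_cons_of_mem _ hm))]
    rw [List.modifyHead_modifyHead]
    rfl

-- canonical "\n".join
def pvJn : List (List Char) → List Char
  | [] => []
  | l :: ls => l ++ ls.flatMap (fun x => '\n' :: x)

theorem pvJn_eq (bl : List (List Char)) : PySem.Chars.join ['\n'] bl = pvJn bl := by
  show List.intercalate ['\n'] bl = pvJn bl
  induction bl with
  | nil => simp [List.intercalate, pvJn]
  | cons l ls ih =>
    cases ls with
    | nil => simp [List.intercalate, List.intersperse, pvJn]
    | cons m ms =>
      have h : List.intercalate ['\n'] (l :: m :: ms)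
          = l ++ ['\n'] ++ List.intercalate ['\n'] (m :: ms) := by
        simp [List.intercalate, List.intersperse]
      rw [h, ih]
      simp [pvJn]

theorem pvFlat_ne (L : List (List Char)) (h : L ≠ []) :
    L.flatMap (fun x => '\n' :: x) = '\n' :: pvJn L := by
  cases L with
  | nil => exact absurd rfl h
  | cons m ms => simp [pvJn]

theorem pvJn_append_singleton (cur : List (List Char)) (ln : List Char) (h : cur ≠ []) :
    pvJn (cur ++ [ln]) = pvJn cur ++ '\n' :: ln := by
  cases cur with
  | nil => exact absurd rfl h
  | cons c cs => simp [pvJn, List.flatMap_append]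

-- the lines of s: nonempty, newline-free, and they rejoin to s
theorem pvLines_ne_nil (s : List Char) : pvSplitSpec ['\n'] s ≠ [] :=
  pvSplitSpec_ne_nil _ s

theorem pvLines_free (s : List Char) : ∀ l ∈ pvSplitSpec ['\n'] s, '\n' ∉ l := by
  fun_induction pvSplitSpec (['\n'] : List Char) s with
  | case1 => simp
  | case2 c rest hp ih =>
    intro l hl
    rcases List.mem_cons.mp hl with h | h
    · simp [h]
    · exact ih l h
  | case3 c rest hp ih =>
    have hc : c ≠ '\n' := by
      intro e
      exact hp (by simp [e, List.isPrefixOf])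
    cases hrec : pvSplitSpec ['\n'] rest with
    | nil => exact absurd hrec (pvSplitSpec_ne_nil _ _)
    | cons m ms =>
      rw [List.modifyHead_cons]
      intro l hl
      rcases List.mem_cons.mp hl with h | h
      · subst h
        intro hmem
        rcases List.mem_cons.mp hmem with h' | h'
        · exact hc h'.symm
        · exact ih m (by rw [hrec]; simp) h'
      · exact ih l (by rw [hrec]; simp [h])

theorem pvLines_join (s : List Char) : pvJn (pvSplitSpec ['\n'] s) = s := by
  fun_induction pvSplitSpec (['\n'] : List Char) s with
  | case1 => simp [pvJn]
  | case2 c rest hp ih =>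
    have hc : '\n' = c := by
      rw [List.isPrefixOf_cons₂] at hp
      simpa [List.isPrefixOf] using hp
    rw [pvJn, pvFlat_ne _ (pvSplitSpec_ne_nil _ _), ih]
    simp [← hc]
  | case3 c rest hp ih =>
    cases hrec : pvSplitSpec ['\n'] rest with
    | nil => exact absurd hrec (pvSplitSpec_ne_nil _ _)
    | cons m ms =>
      rw [List.modifyHead_cons]
      rw [hrec] at ih
      simp only [pvJn] at ih ⊢
      simp [ih]

-- prefix tests through a joined tail
theorem pvPrefix_append : ∀ (d : List Char), '\n' ∉ d →
    ∀ (ln r : List Char), d.isPrefixOf (ln ++ '\n' :: r) = d.isPrefixOf ln := by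
  intro d
  induction d with
  | nil => intros; simp [List.isPrefixOf]
  | cons a d' ih =>
    intro hd ln r
    have ha : (a == '\n') = false := beq_eq_false_iff_ne.mpr (fun e => hd (by simp [e]))
    cases ln with
    | nil => simp [List.isPrefixOf, List.isPrefixOf_cons₂, ha]
    | cons b ln' =>
      rw [List.cons_append, List.isPrefixOf_cons₂, List.isPrefixOf_cons₂]
      rw [ih (fun hm => hd (List.mem_cons_of_mem _ hm)) ln' r]

theorem pvPrefix_jn (ln : List Char) (ls : List (List Char)) :
    pvD.isPrefixOf (ln ++ ls.flatMap (fun x => '\n' :: x)) = pvD.isPrefixOf ln := by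
  cases ls with
  | nil => simp
  | cons m ms =>
    rw [pvFlat_ne (m :: ms) (by simp)]
    exact pvPrefix_append pvD (by decide) ln _

-- the pieces of A's split, as a function of the line list
def pvGK : List (List Char) → List (List Char)
  | [] => [[]]
  | ln :: ls =>
    if pvD.isPrefixOf ln then
      [] :: (pvGK ls).modifyHead (ln.drop pvD.length ++ ·)
    else
      (pvGK ls).modifyHead (('\n' :: ln) ++ ·)

theorem pvGK_ne_nil (ls : List (List Char)) : pvGK ls ≠ [] := by
  induction ls with
  | nil => simp [pvGK]
  | cons ln ls ih =>
    rw [pvGK]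
    split
    · simp
    · simp [List.modifyHead_eq_nil_iff, ih]

theorem pvK_eq (ls : List (List Char)) (hfree : ∀ l ∈ ls, '\n' ∉ l) :
    pvSplitSpec ('\n' :: pvD) (ls.flatMap (fun x => '\n' :: x)) = pvGK ls := by
  induction ls with
  | nil => simp [pvGK, pvSplitSpec]
  | cons ln ls ih =>
    have hfree' : ∀ l ∈ ls, '\n' ∉ l := fun l hl => hfree l (List.mem_cons_of_mem _ hl)
    have hln : '\n' ∉ ln := hfree ln (by simp)
    rw [List.flatMap_cons, List.cons_append, pvSplitSpec, pvGK]
    have hpre : (('\n' :: pvD).isPrefixOf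
        ('\n' :: (ln ++ ls.flatMap (fun x => '\n' :: x)))) = pvD.isPrefixOf ln := by
      rw [List.isPrefixOf_cons₂, pvPrefix_jn]
      simp
    rw [hpre]
    by_cases hp : pvD.isPrefixOf ln = true
    · rw [if_pos hp, if_pos hp]
      have hlen : pvD.length ≤ ln.length := (List.isPrefixOf_iff_prefix.mp hp).length_le
      have hlenD : ('\n' :: pvD).length - 1 = pvD.length := by simp
      rw [hlenD, List.drop_append_of_le_length hlen]
      rw [pvFree_append '\n' pvD _ _ (fun hm => hln (List.mem_of_mem_drop hm))]
      rw [ih hfree']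
    · rw [if_neg hp, if_neg hp]
      rw [pvFree_append '\n' pvD _ _ hln]
      rw [ih hfree', List.modifyHead_modifyHead]
      rfl

-- B's blocks, as a function of the line list (current block joined into its first component)
def pvH (l : List Char) : List (List Char) → List (List Char)
  | [] => [l]
  | ln :: ls => if pvD.isPrefixOf ln then l :: pvH ln ls else pvH (l ++ '\n' :: ln) ls

-- A's re-prefixing of the tail pieces
def pvRestore : List (List Char) → List (List Char)
  | [] => []
  | p :: ps => p :: ps.map (pvD ++ ·)

theorem pvDrop_eq (ln : List Char) (hp : pvD.isPrefixOf ln = true) :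
    pvD ++ ln.drop pvD.length = ln := by
  obtain ⟨t, rfl⟩ := List.isPrefixOf_iff_prefix.mp hp
  simp

theorem pvMap_G (ls : List (List Char)) :
    ∀ l, (((pvGK ls).modifyHead (l ++ ·)).map (pvD ++ ·)) = pvH (pvD ++ l) ls := by
  induction ls with
  | nil => intro l; simp [pvGK, pvH]
  | cons ln ls ih =>
    intro l
    rw [pvGK]
    by_cases hp : pvD.isPrefixOf ln = true
    · rw [if_pos hp, List.modifyHead_cons, List.map_cons]
      rw [ih (ln.drop pvD.length), pvDrop_eq ln hp]
      rw [pvH, if_pos hp]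
      simp
    · rw [if_neg hp, List.modifyHead_modifyHead]
      have hc : ((l ++ ·) ∘ (('\n' :: ln) ++ ·)) = ((l ++ '\n' :: ln) ++ ·) := by
        funext x; simp
      rw [hc, ih (l ++ '\n' :: ln), pvH, if_neg hp, List.append_assoc]

theorem pvRestore_G (ls : List (List Char)) :
    ∀ l, pvRestore ((pvGK ls).modifyHead (l ++ ·)) = pvH l ls := by
  induction ls with
  | nil => intro l; simp [pvGK, pvRestore, pvH]
  | cons ln ls ih =>
    intro l
    rw [pvGK]
    by_cases hp : pvD.isPrefixOf ln = true
    · rw [if_pos hp, List.modifyHead_cons, pvRestore]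
      rw [pvMap_G ls (ln.drop pvD.length), pvDrop_eq ln hp]
      rw [pvH, if_pos hp]
      simp
    · rw [if_neg hp, List.modifyHead_modifyHead]
      have hc : ((l ++ ·) ∘ (('\n' :: ln) ++ ·)) = ((l ++ '\n' :: ln) ++ ·) := by
        funext x; simp
      rw [hc, ih (l ++ '\n' :: ln), pvH, if_neg hp]

-- the common per-piece dictionary step
def pvStep (out : PySem.Dict (List Char) (List Char)) (piece0 : List Char) :
    PySem.Dict (List Char) (List Char) :=
  let piece := PySem.Chars.strip piece0
  if piece = [] then out
  else
    let firstLine := (PySem.Chars.splitlines piece).headD []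
    let path := if PySem.Chars.isIn " b/".toList firstLine
      then PySem.Chars.strip ((PySem.List.pyGet? (PySem.Chars.splitOnMax firstLine " b/".toList 1) 1).getD [])
      else "unknown".toList
    out.insert path piece

theorem pvFlush_eq (out : PySem.Dict (List Char) (List Char)) (bl : List (List Char)) :
    pvFlush out bl = pvStep out (pvJn bl) := by
  simp only [pvFlush, pvStep, pvJn_eq]

-- B's loop step and final flush, named
def pvBStep (st : PySem.Dict (List Char) (List Char) × List (List Char)) (ln : List Char) :
    PySem.Dict (List Char) (List Char) × List (List Char) :=
  if PySem.Chars.startswith ln pvD then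
    (if st.2 = [] then st.1 else pvFlush st.1 st.2, [ln])
  else
    (st.1, st.2 ++ [ln])

def pvFinish (st : PySem.Dict (List Char) (List Char) × List (List Char)) :
    PySem.Dict (List Char) (List Char) :=
  if st.2 = [] then st.1 else pvFlush st.1 st.2

theorem pvStartswith_eq (ln d : List Char) : PySem.Chars.startswith ln d = d.isPrefixOf ln := by
  rw [Bool.eq_iff_iff, PySem.Chars.startswith_iff, List.isPrefixOf_iff_prefix]

-- A's enumerate-indexed loop is the pvStep fold over the re-prefixed pieces
theorem pvEnum_aux (ps : List (List Char)) :
    ∀ (out : PySem.Dict (List Char) (List Char)) (k : Int), 0 < k →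
      (PySem.List.enumerate ps k).foldl
        (fun out ip => pvStep out (if ip.1 == 0 then ip.2 else pvD ++ ip.2)) out
      = (ps.map (pvD ++ ·)).foldl pvStep out := by
  induction ps with
  | nil => intros; simp [PySem.List.enumerate_nil]
  | cons p ps ih =>
    intro out k hk
    rw [PySem.List.enumerate_cons, List.map_cons, List.foldl_cons, List.foldl_cons]
    have hb : (k == 0) = false := beq_eq_false_iff_ne.mpr (by omega)
    rw [if_neg (by simp [hb])]
    exact ih _ (k + 1) (by omega)

theorem pvEnum_fold (p : List Char) (ps : List (List Char))
    (out : PySem.Dict (List Char) (List Char)) :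
    (PySem.List.enumerate (p :: ps)).foldl
      (fun (out : PySem.Dict (List Char) (List Char)) (ip : Int × List Char) =>
        pvStep out (if ip.1 == 0 then ip.2 else pvD ++ ip.2)) out
    = (pvRestore (p :: ps)).foldl pvStep out := by
  rw [show pvRestore (p :: ps) = p :: ps.map (pvD ++ ·) from rfl]
  rw [PySem.List.enumerate_cons, List.foldl_cons, List.foldl_cons]
  rw [if_pos (by simp)]
  exact pvEnum_aux ps _ 1 one_pos

-- B's scan with final flush is the pvStep fold over pvH
theorem pvB_fold (ls : List (List Char)) :
    ∀ (out : PySem.Dict (List Char) (List Char)) (cur : List (List Char)), cur ≠ [] →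
      pvFinish (ls.foldl pvBStep (out, cur)) = (pvH (pvJn cur) ls).foldl pvStep out := by
  induction ls with
  | nil =>
    intro out cur hc
    rw [List.foldl_nil, pvFinish, if_neg hc, pvFlush_eq]
    simp [pvH]
  | cons ln ls ih =>
    intro out cur hc
    rw [List.foldl_cons]
    by_cases hs : pvD.isPrefixOf ln = true
    · rw [show pvBStep (out, cur) ln = (pvFlush out cur, [ln]) from by
        rw [pvBStep, pvStartswith_eq, if_pos hs]
        simp [hc]]
      rw [ih (pvFlush out cur) [ln] (by simp)]
      rw [pvFlush_eq]
      rw [show pvJn [ln] = ln from by simp [pvJn]]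
      rw [pvH, if_pos hs, List.foldl_cons]
    · rw [show pvBStep (out, cur) ln = (out, cur ++ [ln]) from by
        rw [pvBStep, pvStartswith_eq, if_neg hs]]
      rw [ih out (cur ++ [ln]) (by simp)]
      rw [pvJn_append_singleton cur ln hc]
      rw [pvH, if_neg hs]

-- ===== VERDICT (by name: the statement is the Claim_ definition above) =====
theorem split_diff_by_file_py_spec : Claim_equal_split_diff_by_file_py := by
  intro raw _
  unfold Spec_split_diff_by_file_py
  simp only [split_diff_by_file_py, split_diff_by_file_py_alt]
  by_cases hstrip : PySem.Chars.strip raw.toList = []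
  · rw [if_pos hstrip, if_pos hstrip]
  · rw [if_neg hstrip, if_neg hstrip] -- the line decomposition of the input
    obtain ⟨l0, ls, hLs⟩ : ∃ l0 ls, pvSplitSpec ['\n'] raw.toList = l0 :: ls := by
      cases h : pvSplitSpec ['\n'] raw.toList with
      | nil => exact absurd h (pvLines_ne_nil _)
      | cons a b => exact ⟨a, b, rfl⟩
    have hfree0 : '\n' ∉ l0 := pvLines_free _ _ (by rw [hLs]; simp)
    have hfreet : ∀ l ∈ ls, '\n' ∉ l := fun l hl => pvLines_free _ _ (by rw [hLs]; simp [hl])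
    have hjoin : raw.toList = l0 ++ ls.flatMap (fun x => '\n' :: x) := by
      conv_lhs => rw [← pvLines_join raw.toList, hLs]
      simp [pvJn]
    obtain ⟨g, gs, hg⟩ : ∃ g gs, pvGK ls = g :: gs := by
      cases h : pvGK ls with
      | nil => exact absurd h (pvGK_ne_nil _)
      | cons a b => exact ⟨a, b, rfl⟩
    have hA : PySem.Chars.splitOn raw.toList ('\n' :: pvD) = (l0 ++ g) :: gs := by
      rw [pvSplitOn_eq _ _ (by simp)]
      conv_lhs => rw [hjoin]
      rw [pvFree_append '\n' pvD l0 _ hfree0, pvK_eq ls hfreet, hg, List.modifyHead_cons]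
    have hAfold :
        (PySem.List.enumerate (PySem.Chars.splitOn raw.toList ('\n' :: pvD))).foldl
          (fun (out : PySem.Dict (List Char) (List Char)) (ip : Int × List Char) =>
            pvStep out (if ip.1 == 0 then ip.2 else pvD ++ ip.2)) PySem.Dict.empty
        = (pvH l0 ls).foldl pvStep PySem.Dict.empty := by
      rw [hA, pvEnum_fold]
      rw [show (l0 ++ g) :: gs = (pvGK ls).modifyHead (l0 ++ ·) from by
        rw [hg, List.modifyHead_cons]]
      rw [pvRestore_G]
    have hBfold :
        pvFinish ((PySem.Chars.splitOn raw.toList ['\n']).foldl pvBStep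
          (PySem.Dict.empty, ([] : List (List Char))))
        = (pvH l0 ls).foldl pvStep PySem.Dict.empty := by
      rw [pvSplitOn_eq _ _ (by simp), hLs, List.foldl_cons]
      have h1 : pvBStep (PySem.Dict.empty, ([] : List (List Char))) l0
          = (PySem.Dict.empty, [l0]) := by
        rw [pvBStep]
        by_cases hs : PySem.Chars.startswith l0 pvD = true
        · rw [if_pos hs]; simp
        · rw [if_neg hs]; simp
      rw [h1, pvB_fold ls _ [l0] (by simp)]
      rw [show pvJn [l0] = l0 from by simp [pvJn]]
    show ((PySem.List.enumerate (PySem.Chars.splitOn raw.toList ('\n' :: pvD))).foldl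
          (fun (out : PySem.Dict (List Char) (List Char)) (ip : Int × List Char) =>
            pvStep out (if ip.1 == 0 then ip.2 else pvD ++ ip.2)) PySem.Dict.empty).items.map
        (fun kv => (String.ofList kv.1, String.ofList kv.2))
      = (pvFinish ((PySem.Chars.splitOn raw.toList ['\n']).foldl pvBStep
          (PySem.Dict.empty, ([] : List (List Char))))).items.map
        (fun kv => (String.ofList kv.1, String.ofList kv.2))
    rw [hAfold, hBfold]
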